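-- pv_equiv track=rewrite | github.com/kcyeon0127/visdom | visdomrag/pipeline.py | parse_combined_output
-- ===== SOURCE A (Python) =====
-- from typing import Dict, List, Optional, Sequence, Tuple
--
-- def parse_combined_output(text: str) -> Dict[str, str]:
--     """응답 결합 단계에서 생성된 ## 헤더 기반 텍스트를 dict로 정리."""
--     sections = {'Analysis': '', 'Conclusion': '', 'Final Answer': ''}
--     current_section: Optional[str] = None
--     for line in text.split('\n'):
--         if line.startswith('## '):
--             current_section = line[3:].strip(':')
--             continue
--         if current_section in sections:
--             sections[current_section] += line + '\n'
--     for key in sections: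
--         sections[key] = sections[key].strip()
--     return sections
-- ===== SOURCE B (Python) =====
-- def parse_combined_output(text):
--     """Chunk-based rewrite: one split of the newline-prefixed text on the
--     section-header marker, instead of a line-by-line scan with a
--     current-section flag."""
--     sections = {'Analysis': '', 'Conclusion': '', 'Final Answer': ''}
--     for chunk in ('\n' + text).split('\n## ')[1:]:
--         parts = chunk.split('\n', 1)
--         key = parts[0].strip(':')
--         if key in sections and len(parts) > 1:
--             sections[key] += parts[1] + '\n'
--     return {k: v.strip() for k, v in sections.items()}
-- ===== Notes on version B (the rewrite author's own statement) =====
-- stated objective: alternative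
-- what changed: Replaces the per-line scan with a mutable current-section flag by a single split of the newline-prefixed text on the section-header marker into header-led chunks, each chunk partitioned once into header and body and appended to its section.
import Mathlib
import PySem

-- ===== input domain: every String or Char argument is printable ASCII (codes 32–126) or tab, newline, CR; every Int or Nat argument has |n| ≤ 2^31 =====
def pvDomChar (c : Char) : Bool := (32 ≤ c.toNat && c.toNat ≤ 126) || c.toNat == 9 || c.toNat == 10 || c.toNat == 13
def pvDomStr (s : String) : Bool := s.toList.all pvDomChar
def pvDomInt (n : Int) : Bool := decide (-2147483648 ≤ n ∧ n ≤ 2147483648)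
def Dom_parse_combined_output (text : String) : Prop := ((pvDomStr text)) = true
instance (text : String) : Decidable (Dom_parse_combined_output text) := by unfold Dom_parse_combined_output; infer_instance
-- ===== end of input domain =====

-- ===== PORT A =====
-- A: line scan with a mutable current-section flag over text.split('\n').
-- loop body of A's for-loop, as a named helper
def pvAStep (st : Option String × PySem.Dict String String) (line : String) :
    Option String × PySem.Dict String String :=
  if PySem.Str.startswith line "## " then
    (some (PySem.Str.stripChars (PySem.Str.slice line (some 3) none) ":"), st.2)
  else
    match st.1 with
    | some cur =>
        if st.2.contains cur then (st.1, st.2.modify cur "" (fun v => v ++ line ++ "\n"))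
        else st
    | none => st

def parse_combined_output (text : String) : List (String × String) :=
  let st := ((PySem.Str.split? text "\n").getD []).foldl pvAStep
    (none, PySem.Dict.ofList [("Analysis", ""), ("Conclusion", ""), ("Final Answer", "")])
  (st.2.keys.foldl (fun d k => d.insert k (PySem.Str.strip (d.getD k ""))) st.2).items

-- ===== PORT B =====
-- B (alternative decomposition): one split of the newline-prefixed text on the
-- section-header marker into header-led chunks; each chunk is partitioned once
-- (split with maxsplit 1) into header and body.  No per-line loop, no mutable
-- current-section flag.
-- loop body of B's for-loop, as a named helper
def pvBStep (d : PySem.Dict String String) (chunk : String) : PySem.Dict String String :=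
  let parts := (PySem.Str.splitMax? chunk "\n" 1).getD []
  let key := PySem.Str.stripChars (PySem.List.pyGetD parts 0 "") ":"
  if d.contains key && decide (1 < parts.length) then
    d.modify key "" (fun v => v ++ PySem.List.pyGetD parts 1 "" ++ "\n")
  else d

def parse_combined_output_alt (text : String) : List (String × String) :=
  ((((PySem.Str.split? ("\n" ++ text) "\n## ").getD []).drop 1).foldl pvBStep
      (PySem.Dict.ofList [("Analysis", ""), ("Conclusion", ""), ("Final Answer", "")])).items.map
    (fun p => (p.1, PySem.Str.strip p.2))

-- ===== PRECONDITION & SPEC =====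
def Spec_parse_combined_output (text : String) (out : List (String × String)) : Prop := out = parse_combined_output_alt text
instance (text : String) (out : List (String × String)) : Decidable (Spec_parse_combined_output text out) := by unfold Spec_parse_combined_output; infer_instance

-- ===== CLAIM (what is proved, stated in full; the proofs are below) =====
def Claim_equal_parse_combined_output : Prop := ∀ (text : String), Dom_parse_combined_output text → Spec_parse_combined_output text (parse_combined_output text)

-- ===== LEMMAS AND PROOFS =====

-- ---------- reference splitter: CPython str.split(sep) for nonempty sep, fuel-free ----------
def pvSp : List Char → List Char → List (List Char)
  | _, [] => [[]]
  | [], l => [l]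
  | s0 :: s', c :: rest =>
    if (s0 :: s').isPrefixOf (c :: rest) then
      [] :: pvSp (s0 :: s') (rest.drop s'.length)
    else
      (pvSp (s0 :: s') rest).modifyHead (c :: ·)
  termination_by _ l => l.length
  decreasing_by
  · simp only [List.length_drop, List.length_cons]
    omega
  · simp

lemma pvSp_nil (sep : List Char) : pvSp sep [] = [[]] := by
  rw [pvSp.eq_def]

lemma pvSp_cons (s0 : Char) (s' : List Char) (c : Char) (rest : List Char) :
    pvSp (s0 :: s') (c :: rest) =
      if (s0 :: s').isPrefixOf (c :: rest) then
        [] :: pvSp (s0 :: s') (rest.drop s'.length)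
      else
        (pvSp (s0 :: s') rest).modifyHead (c :: ·) := by
  rw [pvSp.eq_def]

lemma pvModifyHead_comp (xs : List (List Char)) (f g : List Char → List Char) :
    (xs.modifyHead g).modifyHead f = xs.modifyHead (fun x => f (g x)) := by
  cases xs <;> simp

lemma pvGo_eq (s0 : Char) (s' : List Char) :
    ∀ (fuel : Nat) (l cur : List Char) (acc : List (List Char)), l.length ≤ fuel →
      PySem.Chars.splitOn.go (s0 :: s') fuel l cur acc
        = acc.reverse ++ (pvSp (s0 :: s') l).modifyHead (cur.reverse ++ ·) := by
  intro fuel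
  induction fuel with
  | zero =>
    intro l cur acc hl
    have : l = [] := by
      cases l with
      | nil => rfl
      | cons c r => simp at hl
    subst this
    rw [PySem.Chars.splitOn.go.eq_def]
    simp [pvSp]
  | succ fuel ih =>
    intro l cur acc hl
    cases l with
    | nil =>
      rw [PySem.Chars.splitOn.go.eq_def]
      simp [pvSp]
    | cons c rest =>
      rw [PySem.Chars.splitOn.go.eq_def]
      simp only []
      by_cases hp : (s0 :: s').isPrefixOf (c :: rest) = true
      · rw [if_pos hp]
        rw [ih (List.drop (s0 :: s').length (c :: rest)) [] (cur.reverse :: acc) ?_]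
        · have hstep : pvSp (s0 :: s') (c :: rest) = [] :: pvSp (s0 :: s') (rest.drop s'.length) := by
            rw [pvSp]; rw [if_pos hp]
          rw [hstep]
          have : List.drop (s0 :: s').length (c :: rest) = rest.drop s'.length := by simp
          rw [this]
          cases hres : pvSp (s0 :: s') (rest.drop s'.length) <;> simp
        · simp at hl ⊢
          try omega
      · rw [if_neg hp]
        rw [ih rest (c :: cur) acc (by simp at hl; omega)]
        have hstep : pvSp (s0 :: s') (c :: rest) = (pvSp (s0 :: s') rest).modifyHead (c :: ·) := by
          rw [pvSp]; rw [if_neg hp]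
        rw [hstep, pvModifyHead_comp]
        cases hres : pvSp (s0 :: s') rest <;> simp

lemma pvSplitOn_eq (s0 : Char) (s' l : List Char) :
    PySem.Chars.splitOn l (s0 :: s') = pvSp (s0 :: s') l := by
  unfold PySem.Chars.splitOn
  rw [pvGo_eq s0 s' (l.length + 1) l [] [] (by omega)]
  cases hres : pvSp (s0 :: s') l <;> simp

-- ---------- the newline splitter ----------
def pvNL : List Char := ['\n']

def pvJ (LL : List (List Char)) : List Char := (LL.map (fun l => '\n' :: l)).flatten

lemma pvSp_ne_nil (sep l : List Char) : pvSp sep l ≠ [] := by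
  induction sep, l using pvSp.induct with
  | case1 sep => rw [pvSp_nil]; simp
  | case2 => rw [pvSp.eq_def]; simp
  | case3 s0 s' c rest h ih => rw [pvSp_cons, if_pos h]; simp
  | case4 s0 s' c rest h ih =>
      rw [pvSp_cons, if_neg h]
      cases hres : pvSp (s0 :: s') rest <;> simp_all

lemma pvSp_nl_nil : pvSp pvNL [] = [[]] := pvSp_nil pvNL

lemma pvSp_nl_cons_nl (r : List Char) : pvSp pvNL ('\n' :: r) = [] :: pvSp pvNL r := by
  simp only [pvNL]
  rw [pvSp_cons]
  simp [List.isPrefixOf]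

lemma pvSp_nl_cons (c : Char) (r : List Char) (h : c ≠ '\n') :
    pvSp pvNL (c :: r) = (pvSp pvNL r).modifyHead (c :: ·) := by
  simp only [pvNL]
  rw [pvSp_cons]
  rw [if_neg]
  simp [List.isPrefixOf]
  exact fun heq => absurd heq.symm h

lemma pvJ_pvSp (t : List Char) : pvJ (pvSp pvNL t) = '\n' :: t := by
  induction t with
  | nil => rw [pvSp_nl_nil]; rfl
  | cons c r ih =>
    by_cases hc : c = '\n'
    · subst hc
      rw [pvSp_nl_cons_nl]
      simpa [pvJ] using ih
    · rw [pvSp_nl_cons c r hc]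
      rcases hres : pvSp pvNL r with _ | ⟨h0, tl⟩
      · exact absurd hres (pvSp_ne_nil _ _)
      · rw [hres] at ih
        simp only [pvJ, List.modifyHead_cons, List.map_cons, List.flatten_cons,
          List.cons_append] at ih ⊢
        have h2 : h0 ++ (List.map (fun l => '\n' :: l) tl).flatten = r := by
          simpa using ih
        simp [← h2]

lemma pvSp_nl_free (t : List Char) : ∀ l ∈ pvSp pvNL t, '\n' ∉ l := by
  induction t with
  | nil => simp [pvSp_nl_nil]
  | cons c r ih =>
    by_cases hc : c = '\n'
    · subst hc; rw [pvSp_nl_cons_nl]; simpa using ih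
    · rw [pvSp_nl_cons c r hc]
      rcases hres : pvSp pvNL r with _ | ⟨h0, tl⟩
      · exact absurd hres (pvSp_ne_nil _ _)
      · rw [hres] at ih
        simp only [List.modifyHead_cons]
        intro l hl
        rcases List.mem_cons.mp hl with rfl | hl
        · intro hmem
          rcases List.mem_cons.mp hmem with h | h
          · exact hc h.symm
          · exact ih h0 List.mem_cons_self h
        · exact ih l (List.mem_cons_of_mem _ hl)

-- ---------- the '\n## ' splitter and header grouping ----------
def pvSep4 : List Char := ['\n', '#', '#', ' ']

def pvHdr : List Char → Bool
  | a :: b :: c :: _ => a == '#' && b == '#' && c == ' '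
  | _ => false

lemma pvHdr_eq_isPrefixOf (l : List Char) : pvHdr l = ['#', '#', ' '].isPrefixOf l := by
  rcases l with _ | ⟨a, _ | ⟨b, _ | ⟨c, l'⟩⟩⟩
  · rfl
  · simp [pvHdr, List.isPrefixOf]
  · simp [pvHdr, List.isPrefixOf]
  · simp only [pvHdr, List.isPrefixOf]
    by_cases ha : a = '#' <;> by_cases hb : b = '#' <;> by_cases hc : c = ' ' <;>
      simp [ha, hb, hc, eq_comm, beq_eq_decide]

lemma pvHdr_shape (l : List Char) (h : pvHdr l = true) :
    l = '#' :: '#' :: ' ' :: l.drop 3 := by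
  rcases l with _ | ⟨a, _ | ⟨b, _ | ⟨c, l'⟩⟩⟩ <;> simp [pvHdr] at h
  obtain ⟨⟨rfl, rfl⟩, rfl⟩ := h
  rfl

lemma pvSp4_cons_nl (rest : List Char) :
    pvSp pvSep4 ('\n' :: rest) =
      if pvHdr rest then [] :: pvSp pvSep4 (rest.drop 3)
      else (pvSp pvSep4 rest).modifyHead ('\n' :: ·) := by
  simp only [pvSep4]
  rw [pvSp_cons]
  have hc : (('\n' :: ['#', '#', ' ']).isPrefixOf ('\n' :: rest)) = pvHdr rest := by
    rw [pvHdr_eq_isPrefixOf]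
    simp [List.isPrefixOf]
  rw [hc]
  rcases hb : pvHdr rest <;> simp

lemma pvSp4_append (l r : List Char) (hl : '\n' ∉ l) :
    pvSp pvSep4 (l ++ r) = (pvSp pvSep4 r).modifyHead (l ++ ·) := by
  induction l with
  | nil =>
    simp only [List.nil_append]
    cases pvSp pvSep4 r <;> simp
  | cons c l' ih =>
    have hc : c ≠ '\n' := fun h => hl (by simp [h])
    have hl' : '\n' ∉ l' := fun h => hl (by simp [h])
    simp only [List.cons_append]
    simp only [pvSep4]
    rw [pvSp_cons]
    rw [if_neg]
    · rw [show ('\n' :: ['#', '#', ' '] : List Char) = pvSep4 from rfl] at *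
      rw [ih hl', pvModifyHead_comp]
      try rfl
    · simp [List.isPrefixOf]
      exact fun h => absurd h.symm hc

lemma pvHdr_append_pvJ (l : List Char) (r : List (List Char)) (hl : '\n' ∉ l)
    (h : pvHdr l = false) : pvHdr (l ++ pvJ r) = false := by
  rw [pvHdr_eq_isPrefixOf] at h ⊢
  have hJ : pvJ r = [] ∨ ∃ t, pvJ r = '\n' :: t := by
    cases r with
    | nil => exact Or.inl rfl
    | cons x r' => exact Or.inr ⟨x ++ pvJ r', by simp [pvJ]⟩
  rcases l with _ | ⟨a, _ | ⟨b, _ | ⟨c, l'⟩⟩⟩ <;>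
    rcases hJ with hJ | ⟨t, hJ⟩ <;>
    simp_all [List.isPrefixOf] <;> exact h

def pvGroups : List (List Char) → List (List Char × List (List Char))
  | [] => []
  | l :: r =>
    if pvHdr l then
      (l.drop 3, r.takeWhile (fun x => !pvHdr x)) :: pvGroups (r.dropWhile (fun x => !pvHdr x))
    else pvGroups r
  termination_by LL => LL.length
  decreasing_by
  · simpa using Nat.lt_succ_of_le (List.length_dropWhile_le _ _)
  · simp

lemma pvGroups_nil : pvGroups [] = [] := by rw [pvGroups.eq_def]

lemma pvGroups_cons (l : List Char) (r : List (List Char)) :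
    pvGroups (l :: r) =
      if pvHdr l then
        (l.drop 3, r.takeWhile (fun x => !pvHdr x)) :: pvGroups (r.dropWhile (fun x => !pvHdr x))
      else pvGroups r := by
  rw [pvGroups.eq_def]

lemma pvGroups_dropWhile (r : List (List Char)) :
    pvGroups (r.dropWhile (fun x => !pvHdr x)) = pvGroups r := by
  induction r with
  | nil => simp
  | cons x r' ih =>
    by_cases hx : pvHdr x
    · simp [hx]
    · rw [List.dropWhile_cons]
      simp only [hx, Bool.not_false, if_true]
      rw [ih, pvGroups_cons, if_neg (by simp [hx])]

def pvChunk (g : List Char × List (List Char)) : List Char := g.1 ++ pvJ g.2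

lemma pvMaster (LL : List (List Char)) (hfree : ∀ l ∈ LL, '\n' ∉ l) :
    pvSp pvSep4 (pvJ LL) =
      pvJ (LL.takeWhile (fun x => !pvHdr x)) :: (pvGroups LL).map pvChunk := by
  induction LL with
  | nil =>
    rw [show pvJ [] = [] from rfl, pvSp_nil, pvGroups_nil]
    rfl
  | cons l r ih =>
    have hlf : '\n' ∉ l := hfree l (by simp)
    have hrf : ∀ x ∈ r, '\n' ∉ x := fun x hx => hfree x (by simp [hx])
    have hJ : pvJ (l :: r) = '\n' :: (l ++ pvJ r) := by simp [pvJ]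
    rw [hJ]
    by_cases hh : pvHdr l
    · -- header line
      have hshape := pvHdr_shape l hh
      have hcond : pvHdr (l ++ pvJ r) = true := by
        rw [hshape]; simp [pvHdr]
      rw [pvSp4_cons_nl, if_pos hcond]
      have hdropf : '\n' ∉ l.drop 3 := fun hx => hlf (List.mem_of_mem_drop hx)
      have hdrop : (l ++ pvJ r).drop 3 = l.drop 3 ++ pvJ r := by
        conv_lhs => rw [hshape]
        simp
      rw [hdrop, pvSp4_append _ _ hdropf, ih hrf]
      rw [pvGroups_cons, if_pos hh, List.takeWhile_cons_of_neg (by simp [hh])]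
      simp [pvChunk, pvGroups_dropWhile, pvJ]
    · -- non-header line
      have hcond := pvHdr_append_pvJ l r hlf (by simpa using hh)
      rw [pvSp4_cons_nl, if_neg (by simp [hcond])]
      rw [pvSp4_append _ _ hlf, ih hrf, pvModifyHead_comp]
      rw [pvGroups_cons, if_neg (by simp [hh]), List.takeWhile_cons_of_pos (by simp [hh])]
      simp [pvJ]

-- ---------- chunk.split('\n', 1) on a header chunk ----------
lemma pvGoMax_zero (fuel : Nat) (l cur : List Char) (acc : List (List Char)) :
    PySem.Chars.splitOnMax.go ['\n'] fuel 0 l cur acc = ((cur.reverse ++ l) :: acc).reverse := by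
  rw [PySem.Chars.splitOnMax.go.eq_def]
  cases fuel <;> cases l <;> simp

lemma pvGoMax_one (h : List Char) :
    ∀ (fuel : Nat) (t cur : List Char) (acc : List (List Char)), '\n' ∉ h →
      (t = [] ∨ ∃ t', t = '\n' :: t') → h.length < fuel →
      PySem.Chars.splitOnMax.go ['\n'] fuel 1 (h ++ t) cur acc =
        acc.reverse ++ (if t = [] then [cur.reverse ++ h] else [cur.reverse ++ h, t.tail]) := by
  induction h with
  | nil =>
    intro fuel t cur acc _ ht hf
    rcases ht with rfl | ⟨t', rfl⟩
    · rw [PySem.Chars.splitOnMax.go.eq_def]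
      cases fuel <;> simp
    · rcases fuel with _ | fuel
      · omega
      · rw [PySem.Chars.splitOnMax.go.eq_def]
        simp only [List.nil_append]
        rw [if_neg (by simp)]
        rw [if_pos (by simp [List.isPrefixOf])]
        rw [pvGoMax_zero]
        simp
  | cons c h' ih =>
    intro fuel t cur acc hfree ht hf
    have hc : c ≠ '\n' := fun hh => hfree (by simp [hh])
    rcases fuel with _ | fuel
    · simp at hf
    · rw [PySem.Chars.splitOnMax.go.eq_def]
      simp only [List.cons_append]
      rw [if_neg (by simp)]
      rw [if_neg (by simp [List.isPrefixOf]; exact fun hh => absurd hh.symm hc)]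
      rw [ih fuel t (c :: cur) acc (fun hh => hfree (by simp [hh])) ht (by simp at hf; omega)]
      split <;> simp

lemma pvJ_eq_nil_iff (b : List (List Char)) : pvJ b = [] ↔ b = [] := by
  cases b <;> simp [pvJ]

lemma pvSplitMax_chunk (h : List Char) (b : List (List Char)) (hfree : '\n' ∉ h) :
    PySem.Chars.splitOnMax (h ++ pvJ b) ['\n'] 1 =
      if b = [] then [h] else [h, (pvJ b).drop 1] := by
  unfold PySem.Chars.splitOnMax
  rw [if_neg (by omega)]
  have ht : pvJ b = [] ∨ ∃ t', pvJ b = '\n' :: t' := by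
    cases b with
    | nil => exact Or.inl rfl
    | cons x r' => exact Or.inr ⟨x ++ pvJ r', by simp [pvJ]⟩
  rw [show ((1 : Int).toNat) = 1 from rfl]
  rw [pvGoMax_one h ((h ++ pvJ b).length + 1) (pvJ b) [] [] hfree ht (by simp)]
  rcases ht with ht | ⟨t', ht⟩
  · simp [(pvJ_eq_nil_iff b).mp ht, pvJ]
  · have hb : b ≠ [] := fun hb => by simp [hb, pvJ] at ht
    simp [ht, hb]

-- ---------- the two loop bodies as machines over triples ----------
def pvUpdG (k : List Char) (s : List Char) (t : List Char × List Char × List Char) :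
    List Char × List Char × List Char :=
  if k = "Analysis".toList then (t.1 ++ s, t.2.1, t.2.2)
  else if k = "Conclusion".toList then (t.1, t.2.1 ++ s, t.2.2)
  else if k = "Final Answer".toList then (t.1, t.2.1, t.2.2 ++ s)
  else t

def pvKeyOf (l : List Char) : List Char := PySem.Chars.stripChars (l.drop 3) [':']

def pvStepA (st : Option (List Char) × (List Char × List Char × List Char)) (l : List Char) :
    Option (List Char) × (List Char × List Char × List Char) :=
  if pvHdr l then (some (pvKeyOf l), st.2)
  else
    match st.1 with
    | some k => (st.1, pvUpdG k (l ++ ['\n']) st.2)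
    | none => st

def pvStepB (t : List Char × List Char × List Char) (ch : List Char) :
    List Char × List Char × List Char :=
  let parts := PySem.Chars.splitOnMax ch ['\n'] 1
  let k := PySem.Chars.stripChars (parts.getD 0 []) [':']
  if 1 < parts.length then pvUpdG k (parts.getD 1 [] ++ ['\n']) t else t

def pvGStep (t : List Char × List Char × List Char) (g : List Char × List (List Char)) :
    List Char × List Char × List Char :=
  if g.2 = [] then t else pvUpdG (PySem.Chars.stripChars g.1 [':']) ((pvJ g.2).drop 1 ++ ['\n']) t

lemma pvStepB_chunk (t : List Char × List Char × List Char) (g : List Char × List (List Char))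
    (hfree : '\n' ∉ g.1) : pvStepB t (pvChunk g) = pvGStep t g := by
  obtain ⟨h, b⟩ := g
  simp only [pvChunk, pvStepB, pvGStep]
  rw [pvSplitMax_chunk h b hfree]
  by_cases hb : b = []
  · simp [hb]
  · simp [hb]

lemma pvUpdG_append (k x y : List Char) (t : List Char × List Char × List Char) :
    pvUpdG k y (pvUpdG k x t) = pvUpdG k (x ++ y) t := by
  unfold pvUpdG
  split_ifs <;> simp

lemma pvUpdG_nil (k : List Char) (t : List Char × List Char × List Char) :
    pvUpdG k [] t = t := by
  unfold pvUpdG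
  split_ifs <;> simp

lemma pvAbsorb (k : List Char) (b : List (List Char)) (t : List Char × List Char × List Char) :
    b.foldl (fun t l => pvUpdG k (l ++ ['\n']) t) t =
      pvUpdG k ((b.map (· ++ ['\n'])).flatten) t := by
  induction b generalizing t with
  | nil => simp [pvUpdG_nil]
  | cons l b' ih =>
    simp only [List.foldl_cons, List.map_cons, List.flatten_cons]
    rw [ih, pvUpdG_append]

lemma pvFlatten_body (b : List (List Char)) (hb : b ≠ []) :
    (b.map (· ++ ['\n'])).flatten = (pvJ b).drop 1 ++ ['\n'] := by
  induction b with
  | nil => exact absurd rfl hb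
  | cons l b' ih =>
    by_cases hb' : b' = []
    · simp [hb', pvJ]
    · have hJ : pvJ b' = '\n' :: ((pvJ b').drop 1) := by
        rcases b' with _ | ⟨x, r⟩
        · exact absurd rfl hb'
        · simp [pvJ]
      simp only [List.map_cons, List.flatten_cons, ih hb']
      have hR : (pvJ (l :: b')).drop 1 = l ++ pvJ b' := by simp [pvJ]
      rw [hR]
      conv_rhs => rw [hJ]
      simp

lemma pvGStep_eq_foldl (t : List Char × List Char × List Char) (g : List Char × List (List Char)) :
    pvGStep t g =
      g.2.foldl (fun t l => pvUpdG (PySem.Chars.stripChars g.1 [':']) (l ++ ['\n']) t) t := by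
  obtain ⟨h, b⟩ := g
  by_cases hb : b = []
  · simp [pvGStep, hb]
  · simp only [pvGStep, if_neg hb]
    rw [pvAbsorb, pvFlatten_body b hb]

-- ---------- line machine = group machine ----------
lemma pvRun_some (LL : List (List Char)) :
    ∀ (k : List Char) (t : List Char × List Char × List Char),
      (LL.foldl pvStepA (some k, t)).2 =
        (pvGroups (LL.dropWhile (fun x => !pvHdr x))).foldl pvGStep
          ((LL.takeWhile (fun x => !pvHdr x)).foldl (fun t l => pvUpdG k (l ++ ['\n']) t) t) := by
  induction LL with
  | nil => intro k t; simp [pvGroups_nil]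
  | cons l r ih =>
    intro k t
    by_cases hh : pvHdr l
    · simp only [List.foldl_cons, pvStepA, hh, if_true]
      rw [ih (pvKeyOf l) t]
      rw [List.dropWhile_cons_of_neg (by simp [hh]), List.takeWhile_cons_of_neg (by simp [hh])]
      rw [pvGroups_cons, if_pos hh]
      simp only [List.foldl_cons, List.foldl_nil]
      rw [pvGStep_eq_foldl]
      rfl
    · simp only [List.foldl_cons, pvStepA, hh, if_false, Bool.false_eq_true]
      rw [ih k (pvUpdG k (l ++ ['\n']) t)]
      rw [List.dropWhile_cons_of_pos (by simp [hh]), List.takeWhile_cons_of_pos (by simp [hh])]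
      simp

lemma pvRun_none (LL : List (List Char)) (t : List Char × List Char × List Char) :
    (LL.foldl pvStepA (none, t)).2 = (pvGroups LL).foldl pvGStep t := by
  induction LL with
  | nil => simp [pvGroups_nil]
  | cons l r ih =>
    by_cases hh : pvHdr l
    · simp only [List.foldl_cons, pvStepA, hh, if_true]
      rw [pvRun_some r (pvKeyOf l) t]
      rw [pvGroups_cons, if_pos hh]
      simp only [List.foldl_cons]
      rw [pvGStep_eq_foldl]
      rfl
    · simp only [List.foldl_cons, pvStepA, hh, if_false, Bool.false_eq_true]
      rw [ih, pvGroups_cons, if_neg (by simp [hh])]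

-- ---------- correspondence between the ports (String/Dict level) and the machines ----------
def pvMk3C (t : List Char × List Char × List Char) : PySem.Dict String String :=
  ⟨[("Analysis", String.ofList t.1), ("Conclusion", String.ofList t.2.1),
    ("Final Answer", String.ofList t.2.2)]⟩

lemma pvStr_ext {s t : String} (h : s.toList = t.toList) : s = t := by
  have := congrArg String.ofList h
  simpa using this

lemma pvOfList_ne (x : List Char) (s : String) (h : ¬ x = s.toList) : ¬ (String.ofList x = s) :=
  fun hh => h (by rw [← hh]; simp)

lemma pvDict_step (k : List Char) (line : String) (t : List Char × List Char × List Char) :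
    (if (pvMk3C t).contains (String.ofList k) = true
      then (pvMk3C t).modify (String.ofList k) "" (fun v => v ++ line ++ "\n")
      else pvMk3C t)
    = pvMk3C (pvUpdG k (line.toList ++ ['\n']) t) := by
  have hv1 : String.ofList t.1 ++ line ++ "\n" = String.ofList (t.1 ++ (line.toList ++ ['\n'])) :=
    pvStr_ext (by simp)
  have hv2 : String.ofList t.2.1 ++ line ++ "\n" = String.ofList (t.2.1 ++ (line.toList ++ ['\n'])) :=
    pvStr_ext (by simp)
  have hv3 : String.ofList t.2.2 ++ line ++ "\n" = String.ofList (t.2.2 ++ (line.toList ++ ['\n'])) :=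
    pvStr_ext (by simp)
  by_cases h1 : k = "Analysis".toList
  · subst h1
    rw [show String.ofList "Analysis".toList = "Analysis" by simp]
    simp [pvMk3C, PySem.Dict.modify, PySem.Dict.insert, PySem.Dict.contains,
      PySem.Dict.getD, PySem.Dict.get?, pvUpdG, hv1]
  · by_cases h2 : k = "Conclusion".toList
    · subst h2
      rw [show String.ofList "Conclusion".toList = "Conclusion" by simp]
      simp [pvMk3C, PySem.Dict.modify, PySem.Dict.insert, PySem.Dict.contains,
        PySem.Dict.getD, PySem.Dict.get?, pvUpdG, hv2]
    · by_cases h3 : k = "Final Answer".toList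
      · subst h3
        rw [show String.ofList "Final Answer".toList = "Final Answer" by simp]
        simp [pvMk3C, PySem.Dict.modify, PySem.Dict.insert, PySem.Dict.contains,
          PySem.Dict.getD, PySem.Dict.get?, pvUpdG, hv3]
      · have g1 : ¬ ("Analysis" = String.ofList k) :=
          fun hh => (pvOfList_ne k "Analysis" h1) hh.symm
        have g2 : ¬ ("Conclusion" = String.ofList k) :=
          fun hh => (pvOfList_ne k "Conclusion" h2) hh.symm
        have g3 : ¬ ("Final Answer" = String.ofList k) :=
          fun hh => (pvOfList_ne k "Final Answer" h3) hh.symm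
        rw [if_neg (by simp [pvMk3C, PySem.Dict.contains, g1, g2, g3])]
        unfold pvUpdG
        rw [if_neg h1, if_neg h2, if_neg h3]

lemma pvKey_corr (line : String) :
    PySem.Str.stripChars (PySem.Str.slice line (some 3) none) ":" =
      String.ofList (pvKeyOf line.toList) := by
  apply pvStr_ext
  simp only [PySem.Str.toList_stripChars, PySem.Str.toList_slice, PySem.Chars.slice_eq_listSlice]
  rw [PySem.List.slice_from _ (by omega)]
  simp [pvKeyOf]

lemma pvStepA_corr (cur : Option (List Char)) (t : List Char × List Char × List Char)
    (line : String) :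
    pvAStep (cur.map String.ofList, pvMk3C t) line =
      (((pvStepA (cur, t) line.toList).1).map String.ofList,
        pvMk3C (pvStepA (cur, t) line.toList).2) := by
  have hs : PySem.Str.startswith line "## " = pvHdr line.toList := by
    rw [PySem.Str.startswith_eq, pvHdr_eq_isPrefixOf]; rfl
  unfold pvAStep pvStepA
  rw [hs]
  by_cases hh : pvHdr line.toList
  · simp only [hh, if_true, Option.map_some]
    rw [pvKey_corr]
  · simp only [hh, Bool.false_eq_true, if_false]
    cases cur with
    | none => rfl
    | some k =>
      simp only [Option.map_some]
      have hsplit :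
          (if (pvMk3C t).contains (String.ofList k) = true
            then ((some (String.ofList k) : Option String),
                  (pvMk3C t).modify (String.ofList k) "" (fun v => v ++ line ++ "\n"))
            else ((some (String.ofList k) : Option String), pvMk3C t))
          = ((some (String.ofList k) : Option String),
              if (pvMk3C t).contains (String.ofList k) = true
                then (pvMk3C t).modify (String.ofList k) "" (fun v => v ++ line ++ "\n")
                else pvMk3C t) := by
        split <;> rfl
      rw [hsplit, pvDict_step]

lemma pvA_fold (ls : List String) :
    ∀ (cur : Option (List Char)) (t : List Char × List Char × List Char),
      ls.foldl pvAStep (cur.map String.ofList, pvMk3C t) =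
        (((ls.map String.toList).foldl pvStepA (cur, t)).1.map String.ofList,
          pvMk3C ((ls.map String.toList).foldl pvStepA (cur, t)).2) := by
  induction ls with
  | nil => intro cur t; rfl
  | cons line ls' ih =>
    intro cur t
    simp only [List.foldl_cons, List.map_cons]
    rw [pvStepA_corr]
    exact ih (pvStepA (cur, t) line.toList).1 (pvStepA (cur, t) line.toList).2

lemma pvGetD0_map (ps : List String) : ((ps.map String.toList).getD 0 []) = (ps.getD 0 "").toList := by
  cases ps <;> simp

lemma pvGetD1_map (ps : List String) : ((ps.map String.toList).getD 1 []) = (ps.getD 1 "").toList := by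
  rcases ps with _ | ⟨x, _ | ⟨y, r⟩⟩ <;> simp

lemma pvBStep_corr (t : List Char × List Char × List Char) (chunk : String) :
    pvBStep (pvMk3C t) chunk = pvMk3C (pvStepB t chunk.toList) := by
  have h := PySem.Str.splitMax?_map chunk "\n" 1
  rw [show ("\n" : String).toList = ['\n'] from rfl] at h
  rw [show PySem.Chars.splitMax? chunk.toList ['\n'] 1
        = some (PySem.Chars.splitOnMax chunk.toList ['\n'] 1) from rfl] at h
  rcases hsp : PySem.Str.splitMax? chunk "\n" 1 with _ | ps
  · rw [hsp] at h; simp at h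
  · rw [hsp] at h
    simp only [Option.map_some, Option.some.injEq] at h
    unfold pvBStep pvStepB
    simp only [hsp, Option.getD_some]
    rw [← h]
    rw [PySem.List.pyGetD_zero, PySem.List.pyGetD_ofNat']
    rw [pvGetD0_map, pvGetD1_map]
    have hkey : PySem.Str.stripChars (ps.getD 0 "") ":" =
        String.ofList (PySem.Chars.stripChars (ps.getD 0 "").toList [':']) := by
      apply pvStr_ext
      simp
    rw [hkey]
    have hlen : (ps.map String.toList).length = ps.length := by simp
    rw [hlen]
    by_cases hc : 1 < ps.length
    · simp only [hc, decide_true, Bool.and_true, if_true]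
      have := pvDict_step (PySem.Chars.stripChars (ps.getD 0 "").toList [':']) (ps.getD 1 "") t
      exact this
    · simp only [hc, decide_false, Bool.and_false, if_false]
      rfl

lemma pvB_fold (cs : List String) :
    ∀ (t : List Char × List Char × List Char),
      cs.foldl pvBStep (pvMk3C t) = pvMk3C ((cs.map String.toList).foldl pvStepB t) := by
  induction cs with
  | nil => intro t; rfl
  | cons chunk cs' ih =>
    intro t
    simp only [List.foldl_cons, List.map_cons]
    rw [pvBStep_corr]
    exact ih (pvStepB t chunk.toList)

lemma pvFinal_A (t : List Char × List Char × List Char) :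
    ((pvMk3C t).keys.foldl (fun d k => d.insert k (PySem.Str.strip (d.getD k ""))) (pvMk3C t)).items
      = [("Analysis", PySem.Str.strip (String.ofList t.1)),
         ("Conclusion", PySem.Str.strip (String.ofList t.2.1)),
         ("Final Answer", PySem.Str.strip (String.ofList t.2.2))] := by
  simp [pvMk3C, PySem.Dict.keys, PySem.Dict.insert, PySem.Dict.contains,
    PySem.Dict.getD, PySem.Dict.get?, List.foldl]

lemma pvFinal_B (t : List Char × List Char × List Char) :
    (pvMk3C t).items.map (fun p => (p.1, PySem.Str.strip p.2))
      = [("Analysis", PySem.Str.strip (String.ofList t.1)),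
         ("Conclusion", PySem.Str.strip (String.ofList t.2.1)),
         ("Final Answer", PySem.Str.strip (String.ofList t.2.2))] := by
  simp [pvMk3C]

lemma pvGroups_fst_free (LL : List (List Char)) (hfree : ∀ l ∈ LL, '\n' ∉ l) :
    ∀ g ∈ pvGroups LL, '\n' ∉ g.1 := by
  induction LL using pvGroups.induct with
  | case1 => simp [pvGroups_nil]
  | case2 l r hh ih =>
    rw [pvGroups_cons, if_pos hh]
    intro g hg
    rcases List.mem_cons.mp hg with rfl | hg
    · exact fun hx => hfree l (by simp) (List.mem_of_mem_drop hx)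
    · exact ih (fun x hx => hfree x (List.mem_cons_of_mem _ ((List.dropWhile_sublist _).mem hx)))
        g hg
  | case3 l r hh ih =>
    rw [pvGroups_cons, if_neg (by simp [hh])]
    exact ih (fun x hx => hfree x (List.mem_cons_of_mem _ hx))

-- ===== VERDICT (by name: the statement is the Claim_ definition above) =====
theorem parse_combined_output_spec : Claim_equal_parse_combined_output := by
  unfold Claim_equal_parse_combined_output
  intro text _
  unfold Spec_parse_combined_output
  have hfree : ∀ l ∈ pvSp pvNL text.toList, '\n' ∉ l := pvSp_nl_free text.toList
  -- A's split?: the line list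
  have hA : ∃ ls : List String, PySem.Str.split? text "\n" = some ls ∧
      ls.map String.toList = pvSp pvNL text.toList := by
    have h := PySem.Str.split?_map text "\n"
    rw [show ("\n" : String).toList = ['\n'] from rfl] at h
    rw [show PySem.Chars.split? text.toList ['\n']
          = some (PySem.Chars.splitOn text.toList ['\n']) from rfl] at h
    rw [pvSplitOn_eq] at h
    rcases hsp : PySem.Str.split? text "\n" with _ | ls
    · rw [hsp] at h; simp at h
    · rw [hsp] at h
      simp only [Option.map_some, Option.some.injEq] at h
      exact ⟨ls, rfl, by rw [show pvNL = ['\n'] from rfl]; exact h⟩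
  obtain ⟨ls, hls, hlsL⟩ := hA
  -- B's split?: the chunk list
  have hB : ∃ cs : List String, PySem.Str.split? ("\n" ++ text) "\n## " = some cs ∧
      (cs.drop 1).map String.toList = (pvGroups (pvSp pvNL text.toList)).map pvChunk := by
    have h := PySem.Str.split?_map ("\n" ++ text) "\n## "
    rw [show ("\n## " : String).toList = '\n' :: ['#', '#', ' '] from rfl] at h
    rw [show PySem.Chars.split? ("\n" ++ text).toList ('\n' :: ['#', '#', ' '])
          = some (PySem.Chars.splitOn ("\n" ++ text).toList ('\n' :: ['#', '#', ' '])) from rfl] at h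
    rw [pvSplitOn_eq] at h
    have htl : ("\n" ++ text).toList = '\n' :: text.toList := by simp
    rw [htl] at h
    have hmaster := pvMaster (pvSp pvNL text.toList) hfree
    rw [pvJ_pvSp] at hmaster
    rw [show ('\n' :: ['#', '#', ' '] : List Char) = pvSep4 from rfl, hmaster] at h
    rcases hsp : PySem.Str.split? ("\n" ++ text) "\n## " with _ | cs
    · rw [hsp] at h; simp at h
    · rw [hsp] at h
      simp only [Option.map_some, Option.some.injEq] at h
      refine ⟨cs, rfl, ?_⟩
      rw [List.map_drop, h]
      rfl
  obtain ⟨cs, hcs, hcsL⟩ := hB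
  have hinit : (PySem.Dict.ofList [("Analysis", ""), ("Conclusion", ""), ("Final Answer", "")] :
      PySem.Dict String String) = pvMk3C ([], [], []) := rfl
  -- evaluate port A
  have hfoldA : ls.foldl pvAStep (none, pvMk3C ([], [], [])) =
      (((ls.map String.toList).foldl pvStepA (none, ([], [], []))).1.map String.ofList,
        pvMk3C ((ls.map String.toList).foldl pvStepA (none, ([], [], []))).2) := by
    simpa using pvA_fold ls none ([], [], [])
  have hrunA : ((ls.map String.toList).foldl pvStepA (none, ([], [], []))).2 =
      (pvGroups (pvSp pvNL text.toList)).foldl pvGStep ([], [], []) := by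
    rw [hlsL]
    exact pvRun_none _ _
  have hAval : parse_combined_output text =
      [("Analysis", PySem.Str.strip (String.ofList
          ((pvGroups (pvSp pvNL text.toList)).foldl pvGStep ([], [], [])).1)),
       ("Conclusion", PySem.Str.strip (String.ofList
          ((pvGroups (pvSp pvNL text.toList)).foldl pvGStep ([], [], [])).2.1)),
       ("Final Answer", PySem.Str.strip (String.ofList
          ((pvGroups (pvSp pvNL text.toList)).foldl pvGStep ([], [], [])).2.2))] := by
    unfold parse_combined_output
    rw [hls]
    simp only [Option.getD_some, hinit, hfoldA]
    rw [pvFinal_A]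
    rw [hrunA]
  -- evaluate port B
  have hfoldB : (cs.drop 1).foldl pvBStep (pvMk3C ([], [], [])) =
      pvMk3C (((cs.drop 1).map String.toList).foldl pvStepB ([], [], [])) :=
    pvB_fold (cs.drop 1) ([], [], [])
  have hrunB : (((cs.drop 1).map String.toList).foldl pvStepB ([], [], [])) =
      (pvGroups (pvSp pvNL text.toList)).foldl pvGStep ([], [], []) := by
    rw [hcsL, List.foldl_map]
    exact PySem.List.foldl_congr_mem _ _ _ _
      (fun acc g hg => pvStepB_chunk acc g (pvGroups_fst_free _ hfree g hg))
  have hBval : parse_combined_output_alt text =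
      [("Analysis", PySem.Str.strip (String.ofList
          ((pvGroups (pvSp pvNL text.toList)).foldl pvGStep ([], [], [])).1)),
       ("Conclusion", PySem.Str.strip (String.ofList
          ((pvGroups (pvSp pvNL text.toList)).foldl pvGStep ([], [], [])).2.1)),
       ("Final Answer", PySem.Str.strip (String.ofList
          ((pvGroups (pvSp pvNL text.toList)).foldl pvGStep ([], [], [])).2.2))] := by
    unfold parse_combined_output_alt
    rw [hcs]
    simp only [Option.getD_some, hinit, hfoldB]
    rw [hrunB]
    exact pvFinal_B _
  rw [hAval, hBval]
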